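-- pv_equiv track=rewrite | github.com/yaolinxia/Chinese-word-segmentation | 信息熵实验/information_entrophy(all_mode).py | find_right_word
-- ===== SOURCE A (Python) =====
-- def find_right_word(word_list,index):
-- 	i = index
-- 	name = word_list[i]
-- 	i += 1
--
-- 	while word_list[i] in name:
-- 		if name.find(word_list[i])+len(word_list) == len(name):
-- 			return find_right_word(word_list,i)
-- 		else:
-- 			i += 1
--
-- 	if name in word_list[i]:
-- 		temp = word_list[i].find(name)
-- 		if len(word_list[i]) <= len(name) + temp:
-- 			return word_list[i][0]
-- 		else:
-- 			return word_list[i][temp+len(name)]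
-- 	elif name[-1] == word_list[i][0]:
-- 		return word_list[i][1]
-- 	else:
-- 		return word_list[i][0]
-- ===== SOURCE B (Python) =====
-- def find_right_word(word_list, index):
--     # Iterative form: the tail recursion of the original becomes an outer loop
--     # that keeps the current start index; the inner scan either finds a restart
--     # index (and the outer loop continues there) or the stopping word.
--     i = index
--     while True:
--         name = word_list[i]
--         j = i + 1
--         restart = None
--         while word_list[j] in name:
--             if name.find(word_list[j]) + len(word_list) == len(name):
--                 restart = j
--                 break
--             j += 1
--         if restart is not None:
--             i = restart
--             continue
--         w = word_list[j]
--         if name in w: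
--             temp = w.find(name)
--             if len(w) <= len(name) + temp:
--                 return w[0]
--             return w[temp + len(name)]
--         if name[-1] == w[0]:
--             return w[1]
--         return w[0]
-- ===== Notes on version B (the rewrite author's own statement) =====
-- stated objective: alternative
-- what changed: A's tail recursion on the start index is flattened into an explicit outer while-True loop; the inner scan reports either a restart index (outer loop continues there) or the stopping word, instead of recursing.
import Mathlib
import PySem

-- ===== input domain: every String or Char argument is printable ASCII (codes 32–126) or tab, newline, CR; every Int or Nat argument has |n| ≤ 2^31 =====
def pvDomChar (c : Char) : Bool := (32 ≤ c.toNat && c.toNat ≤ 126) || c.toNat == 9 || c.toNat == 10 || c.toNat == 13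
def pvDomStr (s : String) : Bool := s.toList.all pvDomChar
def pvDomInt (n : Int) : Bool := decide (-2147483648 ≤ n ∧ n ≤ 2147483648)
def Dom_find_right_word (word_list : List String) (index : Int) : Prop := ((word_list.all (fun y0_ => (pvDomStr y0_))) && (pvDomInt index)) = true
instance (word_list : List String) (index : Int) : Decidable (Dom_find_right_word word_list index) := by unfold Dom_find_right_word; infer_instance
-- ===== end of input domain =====

-- B restructures A's tail recursion into an explicit outer loop over the start index
-- (objective: alternative decomposition, same cost); the ports agree on every input,
-- and Pre_ only removes the inputs on which Python A raises.

-- shared primitive: Python's `s[i]` when the result is used as a 1-character string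
def pvCharAt (s : String) (i : Int) : String :=
  match PySem.Str.pyGet? s i with
  | some c => String.ofList [c]
  | none => ""     -- Python: IndexError (kept outside Pre_)

-- needed by the ports' decreasing_by: a successful index is in range
theorem pvSomeInRange {α : Type} (xs : List α) (i : Int) (x : α)
    (h : PySem.List.pyGet? xs i = some x) : -(xs.length : Int) ≤ i ∧ i < xs.length := by
  by_contra hc
  have : PySem.List.pyGet? xs i = none := by
    rw [PySem.List.pyGet?_eq_none_iff]
    intro hr; exact hc ⟨hr.1, hr.2⟩
  simp [this] at h

-- the four measure inequalities the ports' decreasing_by cite (kept as named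
-- lemmas so the termination proofs inside the definitions stay small terms)
theorem pvDecA (n i : Int) (h : i < n) :
    2 * ((n - (i + 1)).toNat) + 1 < 2 * ((n - i).toNat) := by omega
theorem pvDecC (n i : Int) (h : i < n) :
    2 * ((n - (i + 1)).toNat) + 1 < 2 * ((n - i).toNat) + 1 := by omega
theorem pvDecD (n j : Int) (h : j < n) : (n - (j + 1)).toNat < (n - j).toNat := by omega
theorem pvDecE (n index j : Int) (h1 : index + 1 <= j) (h2 : index < n) :
    (n - j).toNat < (n - index).toNat := by omega

-- ===== PORT A =====
mutual
-- transliteration of A: recursion on the start index, inner while as frwLoop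
def find_right_word (word_list : List String) (index : Int) : String :=
  match h : PySem.List.pyGet? word_list index with
  | none => ""     -- Python: IndexError (outside Pre_)
  | some _name => frwLoop word_list _name (index + 1)
termination_by 2 * (((word_list.length : Int) - index).toNat)
decreasing_by
  · exact pvDecA _ _ (pvSomeInRange word_list index _name h).2

def frwLoop (word_list : List String) (name : String) (i : Int) : String :=
  match h : PySem.List.pyGet? word_list i with
  | none => ""     -- Python: IndexError (outside Pre_)
  | some w =>
    if PySem.Str.isIn w name then
      if PySem.Str.find name w + (word_list.length : Int) = PySem.Str.len name then
        find_right_word word_list i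
      else
        frwLoop word_list name (i + 1)
    else
      if PySem.Str.isIn name w then
        if PySem.Str.len w ≤ PySem.Str.len name + PySem.Str.find w name then
          pvCharAt w 0
        else
          pvCharAt w (PySem.Str.find w name + PySem.Str.len name)
      else if PySem.Str.pyGet? name (-1) = PySem.Str.pyGet? w 0 then
        pvCharAt w 1
      else
        pvCharAt w 0
termination_by 2 * (((word_list.length : Int) - i).toNat) + 1
decreasing_by
  · exact Nat.lt_succ_self _
  · exact pvDecC _ _ (pvSomeInRange word_list i w h).2
end

-- ===== PORT B =====
-- post-scan block of B (the branch code after the inner while loop)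
def frwAltFinish (name w : String) : String :=
  if PySem.Str.isIn name w then
    let temp := PySem.Str.find w name
    if PySem.Str.len w ≤ PySem.Str.len name + temp then pvCharAt w 0
    else pvCharAt w (temp + PySem.Str.len name)
  else if PySem.Str.pyGet? name (-1) = PySem.Str.pyGet? w 0 then pvCharAt w 1
  else pvCharAt w 0

-- B's inner scan: returns `.inl j` for "restart at j", `.inr res` for a final result
def frwAltScan (word_list : List String) (name : String) (j : Int) : Sum Int String :=
  match h : PySem.List.pyGet? word_list j with
  | none => .inr ""     -- Python: IndexError (outside Pre_)
  | some w =>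
    if PySem.Str.isIn w name then
      if PySem.Str.find name w + (word_list.length : Int) = PySem.Str.len name then .inl j
      else frwAltScan word_list name (j + 1)
    else .inr (frwAltFinish name w)
termination_by (((word_list.length : Int) - j).toNat)
decreasing_by
  · exact pvDecD _ _ (pvSomeInRange word_list j w h).2

-- unfolding equations of the scan (cited below and by pvScanInlRange)
theorem frwAltScan_none (word_list : List String) (name : String) (j : Int)
    (h : PySem.List.pyGet? word_list j = none) :
    frwAltScan word_list name j = .inr "" := by
  rw [frwAltScan, h]

theorem frwAltScan_some (word_list : List String) (name : String) (j : Int) (w : String)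
    (h : PySem.List.pyGet? word_list j = some w) :
    frwAltScan word_list name j =
      (if PySem.Str.isIn w name then
        (if PySem.Str.find name w + (word_list.length : Int) = PySem.Str.len name then .inl j
         else frwAltScan word_list name (j + 1))
       else .inr (frwAltFinish name w)) := by
  rw [frwAltScan, h]

-- needed by find_right_word_alt's decreasing_by: a restart index came from a successful access
theorem pvScanInlRange (word_list : List String) (name : String) :
    ∀ j r : Int, frwAltScan word_list name j = .inl r →
      j ≤ r ∧ r < word_list.length := by
  intro j r h
  induction j using frwAltScan.induct word_list name with
  | case1 j hnone => rw [frwAltScan_none _ _ _ hnone] at h; simp at h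
  | case2 j w hsome hin hrestart =>
    rw [frwAltScan_some _ _ _ _ hsome, if_pos hin, if_pos hrestart] at h
    injection h with hjr
    subst hjr
    have := pvSomeInRange word_list j w hsome
    omega
  | case3 j w hsome hin hrestart ih =>
    rw [frwAltScan_some _ _ _ _ hsome, if_pos hin, if_neg hrestart] at h
    have := ih h
    omega
  | case4 j w hsome hin =>
    rw [frwAltScan_some _ _ _ _ hsome, if_neg hin] at h
    simp at h

-- B's outer `while True` loop over the current start index
def find_right_word_alt (word_list : List String) (index : Int) : String :=
  match hn : PySem.List.pyGet? word_list index with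
  | none => ""     -- Python: IndexError (outside Pre_)
  | some name =>
    match hs : frwAltScan word_list name (index + 1) with
    | .inl j => find_right_word_alt word_list j     -- `continue` with the restart index
    | .inr res => res
termination_by (((word_list.length : Int) - index).toNat)
decreasing_by
  · exact pvDecE _ _ _ (pvScanInlRange word_list name (index + 1) j hs).1
      (pvSomeInRange word_list index name hn).2

-- ===== PRECONDITION & SPEC =====
-- A's final branch block raises IndexError iff one of its character accesses is out of range;
-- pvSafeFinish is true exactly when it returns (accesses checked in Python's evaluation order).
def pvSafeFinish (name w : String) : Bool :=
  if PySem.Str.isIn name w then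
    (if PySem.Str.len w ≤ PySem.Str.len name + PySem.Str.find w name then
       decide (0 < w.toList.length)      -- w[0]
     else true)                          -- w[temp+len(name)] is in range by the branch condition
  else
    decide (0 < name.toList.length) &&   -- name[-1]
    decide (0 < w.toList.length) &&      -- word_list[i][0]
    (if PySem.Str.pyGet? name (-1) = PySem.Str.pyGet? w 0 then
       decide (2 ≤ w.toList.length)      -- w[1]
     else true)                          -- w[0], nonempty already checked
-- the element at a (possibly negative) position, as Python reads it
def pvElem (wl : List String) (p : Int) : String := (PySem.List.pyGet? wl p).getD ""
-- position r triggers A's restart branch under the current word `name`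
def pvRestartB (wl : List String) (name : String) (r : Int) : Bool :=
  PySem.Str.isIn (pvElem wl r) name &&
  (PySem.Str.find name (pvElem wl r) + (wl.length : Int) == PySem.Str.len name)
-- position p keeps A's inner scan going under the current word `name`
def pvContB (wl : List String) (name : String) (p : Int) : Bool :=
  PySem.Str.isIn (pvElem wl p) name &&
  !(PySem.Str.find name (pvElem wl p) + (wl.length : Int) == PySem.Str.len name)
-- certificate check: `c` lists the restart positions and `t` the stopping position, in order;
-- between consecutive ones every position continues, each restart restarts, and the stop is safe
def pvChainB (wl : List String) (index : Int) (c : List Int) (t : Int) : Bool :=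
  (let seq := (index :: c) ++ [t]
   (seq.zip seq.tail).all fun p => decide (p.1 < p.2)) &&
  (((index :: c).zip (c ++ [t])).all fun pc =>
    (PySem.List.pyRange (pc.1 + 1) pc.2 1).all fun p => pvContB wl (pvElem wl pc.1) p) &&
  (((index :: c).zip c).all fun pr => pvRestartB wl (pvElem wl pr.1) pr.2) &&
  (!(PySem.Str.isIn (pvElem wl t) (pvElem wl (c.getLastD index))) &&
   pvSafeFinish (pvElem wl (c.getLastD index)) (pvElem wl t))
-- positions that could possibly be restarts (performance filter for the certificate search)
def pvCands (wl : List String) (index t : Int) : List Int :=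
  (PySem.List.pyRange (index + 1) t 1).filter fun r =>
    (index :: PySem.List.pyRange (index + 1) r 1).any fun q => pvRestartB wl (pvElem wl q) r
-- Pre_ holds exactly when A returns: the start index is in range and some stopping position t
-- with some increasing chain of restart positions satisfies the bounded membership/substring
-- conditions above (A's execution is one left-to-right pass, so such a certificate exists iff
-- every access stays in range).  It excludes only inputs on which Python A raises IndexError;
-- no input on which A returns a value is excluded (the ports agree even outside Pre_).
def Pre_find_right_word (word_list : List String) (index : Int) : Prop :=
  (decide (-(word_list.length : Int) ≤ index) && decide (index < (word_list.length : Int)) &&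
   (PySem.List.pyRange (index + 1) (word_list.length : Int) 1).any fun t =>
     ((pvCands word_list index t).sublists).any fun c => pvChainB word_list index c t) = true
instance (word_list : List String) (index : Int) : Decidable (Pre_find_right_word word_list index) := by unfold Pre_find_right_word; infer_instance
def pvWitness_find_right_word : List String × Int := (["ab", "xy"], 0)
def Spec_find_right_word (word_list : List String) (index : Int) (out : String) : Prop := out = find_right_word_alt word_list index
instance (word_list : List String) (index : Int) (out : String) : Decidable (Spec_find_right_word word_list index out) := by unfold Spec_find_right_word; infer_instance

-- ===== CLAIM (what is proved, stated in full; the proofs are below) =====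
def Claim_equal_find_right_word : Prop := ∀ (word_list : List String) (index : Int), Dom_find_right_word word_list index → Pre_find_right_word word_list index → Spec_find_right_word word_list index (find_right_word word_list index)

-- ===== LEMMAS AND PROOFS =====
-- interpretation of a scan result by B's outer loop
def pvInterp (word_list : List String) : Sum Int String → String
  | .inl j => find_right_word_alt word_list j
  | .inr res => res

theorem frw_none (word_list : List String) (index : Int)
    (h : PySem.List.pyGet? word_list index = none) :
    find_right_word word_list index = "" := by
  rw [find_right_word, h]

theorem frw_some (word_list : List String) (index : Int) (name : String)
    (h : PySem.List.pyGet? word_list index = some name) :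
    find_right_word word_list index = frwLoop word_list name (index + 1) := by
  rw [find_right_word, h]

theorem frwLoop_some (word_list : List String) (name : String) (i : Int) (w : String)
    (h : PySem.List.pyGet? word_list i = some w) :
    frwLoop word_list name i =
      (if PySem.Str.isIn w name then
        (if PySem.Str.find name w + (word_list.length : Int) = PySem.Str.len name then
          find_right_word word_list i
         else frwLoop word_list name (i + 1))
       else
        if PySem.Str.isIn name w then
          if PySem.Str.len w ≤ PySem.Str.len name + PySem.Str.find w name then pvCharAt w 0
          else pvCharAt w (PySem.Str.find w name + PySem.Str.len name)
        else if PySem.Str.pyGet? name (-1) = PySem.Str.pyGet? w 0 then pvCharAt w 1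
        else pvCharAt w 0) := by
  rw [frwLoop, h]

theorem frwLoop_none (word_list : List String) (name : String) (i : Int)
    (h : PySem.List.pyGet? word_list i = none) :
    frwLoop word_list name i = "" := by
  rw [frwLoop, h]

theorem alt_none (word_list : List String) (index : Int)
    (h : PySem.List.pyGet? word_list index = none) :
    find_right_word_alt word_list index = "" := by
  rw [find_right_word_alt, h]

theorem alt_some (word_list : List String) (index : Int) (name : String)
    (h : PySem.List.pyGet? word_list index = some name) :
    find_right_word_alt word_list index = pvInterp word_list (frwAltScan word_list name (index + 1)) := by
  rw [find_right_word_alt, h]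
  split
  next heq => exact absurd heq (by simp)
  next name1 heq =>
    injection heq with e
    subst e
    split
    next j hs => rw [hs]; rfl
    next res hs => rw [hs]; rfl

-- the two ports agree EVERYWHERE (Pre_ is only needed because Python A raises outside it)
theorem pvKey : ∀ (m : Nat) (word_list : List String),
    (∀ index : Int, 2 * (((word_list.length : Int) - index).toNat) ≤ m →
      find_right_word word_list index = find_right_word_alt word_list index) ∧
    (∀ (name : String) (i : Int), 2 * (((word_list.length : Int) - i).toNat) + 1 ≤ m →
      frwLoop word_list name i = pvInterp word_list (frwAltScan word_list name i)) := by
  intro m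
  induction m using Nat.strong_induction_on with
  | _ m ih =>
    intro word_list
    constructor
    · intro index hm
      cases h : PySem.List.pyGet? word_list index with
      | none => rw [frw_none _ _ h, alt_none _ _ h]
      | some name =>
        have hr := pvSomeInRange word_list index name h
        have hloop := (ih (2 * (((word_list.length : Int) - (index + 1)).toNat) + 1)
          (by omega) word_list).2 name (index + 1) le_rfl
        rw [frw_some _ _ _ h, alt_some _ _ _ h, hloop]
    · intro name i hm
      cases h : PySem.List.pyGet? word_list i with
      | none => rw [frwLoop_none _ _ _ h, frwAltScan_none _ _ _ h]; rfl
      | some w =>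
        have hr := pvSomeInRange word_list i w h
        rw [frwLoop_some _ _ _ _ h, frwAltScan_some _ _ _ _ h]
        by_cases hin : PySem.Str.isIn w name = true
        · rw [if_pos hin, if_pos hin]
          by_cases hrestart : PySem.Str.find name w + (word_list.length : Int) = PySem.Str.len name
          · rw [if_pos hrestart, if_pos hrestart]
            have hmain := (ih (2 * (((word_list.length : Int) - i).toNat))
              (by omega) word_list).1 i le_rfl
            rw [hmain]; rfl
          · rw [if_neg hrestart, if_neg hrestart]
            exact (ih (2 * (((word_list.length : Int) - (i + 1)).toNat) + 1)
              (by omega) word_list).2 name (i + 1) le_rfl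
        · rw [if_neg hin, if_neg hin]
          simp [pvInterp, frwAltFinish]

-- ===== VERDICT (by name: the statement is the Claim_ definition above) =====
theorem find_right_word_spec : Claim_equal_find_right_word := by
  intro word_list index _ _
  unfold Spec_find_right_word
  exact (pvKey (2 * (((word_list.length : Int) - index).toNat)) word_list).1 index le_rfl
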